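-- pv_equiv track=rewrite | github.com/rseeto/obs_clinic_migration | obs-clinic-migration/obs-clinic-migration/obs-clinic-migration.py | _redcap_str_dict
-- ===== SOURCE A (Python) =====
-- def _redcap_str_dict(input_str):
--
--     """Reverse REDCap Data Dictionary string
--
--     Coding for REDCap variables are stored in the 'Choices, Calculations,
--     OR Slider Labels' column of the data dictionary. This function reverses
--     the variable coding.
--
--
--     Args:
--         input_str: A string derived from the REDCap data dictionary which
--             indicates the variable coding. It is expected that the coding
--             integer and the answer label are separated by a comma and
--             entries are separated by a bar (e.g. '1, No | 2, Yes').
--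
--     Returns:
--         A dict where the key is the answer label (from input_str) and the
--         value is the associated integer.
--
--     Comments:
--         Function will process commas in answer label correctly; however,
--         if the answer label contains a bar (|), this will be interpreted
--         as a new entry.
--
--     """
--     str_dict = {}
--
--     dict_val = ""
--     dict_key = ""
--
--     # when value flag is true, loop will add character to dict_val;
--     # when value flage is false, loop will add character to dict_key
--     val_flag = True
--
--     for char in input_str:
--         if char != '|':
--             if val_flag:
--                 if char != ',':
--                     dict_val = dict_val + char
--                 else:
--                     val_flag = False
--             else:
--                     dict_key = dict_key + char
--         else:
--             dict_key = dict_key.strip()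
--             dict_val = dict_val.strip()
--
--             str_dict[dict_key] = dict_val
--
--             dict_key = ""
--             dict_val = ""
--             val_flag = True
--
--     # last key, value pair is not proceeded by a '|' (bar)
--     dict_key = dict_key.strip()
--     dict_val = dict_val.strip()
--     str_dict[dict_key] = dict_val
--
--
--     return(str_dict)
-- ===== SOURCE B (Python) =====
-- def _redcap_str_dict(input_str):
--     """Split-based rewrite: '|' separates entries, first ',' separates value from label."""
--     str_dict = {}
--     for entry in input_str.split('|'):
--         parts = entry.split(',', 1)
--         key = parts[1] if len(parts) == 2 else ''
--         str_dict[key.strip()] = parts[0].strip()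
--     return str_dict
-- ===== Notes on version B (the rewrite author's own statement) =====
-- stated objective: simpler
-- what changed: Replaced A's single-pass character state machine (val/key accumulators plus a comma flag, building strings one character at a time) by splitting the string on the bar separator and splitting each entry at its first comma (split with maxsplit 1), inserting each stripped pair in one short loop.
import Mathlib
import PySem

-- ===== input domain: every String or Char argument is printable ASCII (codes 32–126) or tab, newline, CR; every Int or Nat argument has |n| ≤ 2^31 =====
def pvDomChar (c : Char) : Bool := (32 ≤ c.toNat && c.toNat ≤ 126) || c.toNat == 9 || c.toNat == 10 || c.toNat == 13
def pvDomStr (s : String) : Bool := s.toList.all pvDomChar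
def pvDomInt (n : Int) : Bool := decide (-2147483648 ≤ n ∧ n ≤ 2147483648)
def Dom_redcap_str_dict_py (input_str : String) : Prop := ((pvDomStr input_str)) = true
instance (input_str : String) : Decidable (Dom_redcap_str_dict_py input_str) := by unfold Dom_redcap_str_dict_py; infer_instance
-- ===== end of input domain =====

-- B replaces A's character-by-character flag state machine with split-on-'|' then
-- split-at-first-',' per entry: same result, a plainer decomposition (objective: simpler).

-- ===== PORT A =====
-- A's loop state: (str_dict, dict_val, dict_key, val_flag); the strings dict_val/dict_key
-- are built char by char, carried as List Char (String.mk at the insert points).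
def pvAStep (st : PySem.Dict String String × List Char × List Char × Bool) (c : Char) :
    PySem.Dict String String × List Char × List Char × Bool :=
  let (d, dv, dk, flag) := st
  if c ≠ '|' then
    if flag then
      if c ≠ ',' then (d, dv ++ [c], dk, flag)
      else (d, dv, dk, false)
    else (d, dv, dk ++ [c], flag)
  else
    (d.insert (String.mk (PySem.Chars.strip dk)) (String.mk (PySem.Chars.strip dv)), [], [], true)

def redcap_str_dict_py (input_str : String) : List (String × String) :=
  let st := input_str.toList.foldl pvAStep (PySem.Dict.empty, [], [], true)
  (st.1.insert (String.mk (PySem.Chars.strip st.2.2.1)) (String.mk (PySem.Chars.strip st.2.1))).items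

-- ===== PORT B =====
-- one entry of B's loop: parts = entry.split(',', 1); key = parts[1] if len(parts) == 2 else '';
-- str_dict[key.strip()] = parts[0].strip()
def pvBStep (d : PySem.Dict String String) (entry : List Char) : PySem.Dict String String :=
  let parts := PySem.Chars.splitOnMax entry [','] 1
  let key := if parts.length = 2 then parts.getD 1 [] else []
  d.insert (String.mk (PySem.Chars.strip key)) (String.mk (PySem.Chars.strip (parts.getD 0 [])))

def redcap_str_dict_py_alt (input_str : String) : List (String × String) :=
  ((PySem.Chars.splitOn input_str.toList ['|']).foldl pvBStep PySem.Dict.empty).items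

-- ===== PRECONDITION & SPEC =====
def Spec_redcap_str_dict_py (input_str : String) (out : List (String × String)) : Prop := out = redcap_str_dict_py_alt input_str
instance (input_str : String) (out : List (String × String)) : Decidable (Spec_redcap_str_dict_py input_str out) := by unfold Spec_redcap_str_dict_py; infer_instance

-- ===== CLAIM (what is proved, stated in full; the proofs are below) =====
def Claim_equal_redcap_str_dict_py : Prop := ∀ (input_str : String), Dom_redcap_str_dict_py input_str → Spec_redcap_str_dict_py input_str (redcap_str_dict_py input_str)

-- ===== LEMMAS AND PROOFS =====

-- Structural model of split on the single-character separator b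
def pvSplit (b : Char) : List Char → List (List Char)
  | [] => [[]]
  | c :: cs => if c = b then [] :: pvSplit b cs else (pvSplit b cs).modifyHead (c :: ·)

theorem pvSplit_ne_nil (b : Char) (l : List Char) : pvSplit b l ≠ [] := by
  cases l with
  | nil => simp [pvSplit]
  | cons c cs =>
    simp only [pvSplit]
    split_ifs <;> simp [List.modifyHead_eq_nil_iff, pvSplit_ne_nil b cs]

theorem pv_go_step (b c : Char) (rest cur : List Char) (acc : List (List Char)) (fuel : Nat) :
    PySem.Chars.splitOn.go [b] (fuel+1) (c :: rest) cur acc =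
      if c = b then PySem.Chars.splitOn.go [b] fuel rest [] (cur.reverse :: acc)
      else PySem.Chars.splitOn.go [b] fuel rest (c :: cur) acc := by
  conv_lhs => rw [PySem.Chars.splitOn.go]
  simp [List.isPrefixOf]
  split_ifs with h1 h2 <;> simp_all

theorem pv_go_spec (b : Char) (fuel : Nat) :
    ∀ (l cur : List Char) (acc : List (List Char)), l.length < fuel →
      PySem.Chars.splitOn.go [b] fuel l cur acc =
        acc.reverse ++ (pvSplit b l).modifyHead (cur.reverse ++ ·) := by
  induction fuel with
  | zero => omega
  | succ n ih =>
    intro l cur acc h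
    cases l with
    | nil =>
      rw [PySem.Chars.splitOn.go]
      · simp [pvSplit]
      · omega
    | cons c rest =>
      rw [pv_go_step]
      simp only [List.length_cons] at h
      by_cases hc : c = b
      · rw [if_pos hc, ih rest [] _ (by omega)]
        cases hsp : pvSplit b rest with
        | nil => exact absurd hsp (pvSplit_ne_nil b rest)
        | cons a t => simp [pvSplit, hc, hsp]
      · rw [if_neg hc, ih rest (c :: cur) _ (by omega)]
        simp only [pvSplit, if_neg hc]
        obtain ⟨s0, tl, hs⟩ : ∃ s0 tl, pvSplit b rest = s0 :: tl := by
          cases hsp : pvSplit b rest with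
          | nil => exact absurd hsp (pvSplit_ne_nil b rest)
          | cons a t => exact ⟨a, t, rfl⟩
        simp [hs]

theorem pv_splitOn_eq (b : Char) (l : List Char) :
    PySem.Chars.splitOn l [b] = pvSplit b l := by
  show PySem.Chars.splitOn.go [b] (l.length + 1) l [] [] = _
  rw [pv_go_spec b (l.length+1) l [] [] (by omega)]
  cases hsp : pvSplit b l with
  | nil => exact absurd hsp (pvSplit_ne_nil b l)
  | cons a t => simp

-- Structural model of entry.split(',', 1)
def pvSplit1 : List Char → List (List Char)
  | [] => [[]]
  | c :: cs => if c = ',' then [[], cs] else (pvSplit1 cs).modifyHead (c :: ·)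

theorem pvSplit1_shape (l : List Char) : (∃ v, pvSplit1 l = [v]) ∨ (∃ v k, pvSplit1 l = [v, k]) := by
  induction l with
  | nil => exact Or.inl ⟨[], rfl⟩
  | cons c cs ih =>
    by_cases hc : c = ','
    · exact Or.inr ⟨[], cs, by simp [pvSplit1, hc]⟩
    · rcases ih with ⟨v, hv⟩ | ⟨v, k, hv⟩
      · exact Or.inl ⟨c :: v, by simp [pvSplit1, hc, hv]⟩
      · exact Or.inr ⟨c :: v, k, by simp [pvSplit1, hc, hv]⟩

theorem pv_goM_zero (fuel : Nat) (l cur : List Char) (acc : List (List Char)) :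
    PySem.Chars.splitOnMax.go [','] fuel 0 l cur acc = ((cur.reverse ++ l) :: acc).reverse := by
  cases fuel with
  | zero => rw [PySem.Chars.splitOnMax.go]
  | succ n =>
    cases l with
    | nil =>
      rw [PySem.Chars.splitOnMax.go]
      · simp
      · omega
    | cons c rest =>
      rw [PySem.Chars.splitOnMax.go]
      simp

theorem pv_goM_step (c : Char) (rest cur : List Char) (acc : List (List Char)) (fuel : Nat) :
    PySem.Chars.splitOnMax.go [','] (fuel+1) 1 (c :: rest) cur acc =
      if c = ',' then PySem.Chars.splitOnMax.go [','] fuel 0 rest [] (cur.reverse :: acc)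
      else PySem.Chars.splitOnMax.go [','] fuel 1 rest (c :: cur) acc := by
  conv_lhs => rw [PySem.Chars.splitOnMax.go]
  simp [List.isPrefixOf]
  split_ifs with h1 h2
  · rfl
  · exact absurd h1.symm h2
  · rename_i h3; exact absurd h3.symm h1
  · rfl

theorem pv_goM_spec (fuel : Nat) :
    ∀ (l cur : List Char) (acc : List (List Char)), l.length < fuel →
      PySem.Chars.splitOnMax.go [','] fuel 1 l cur acc =
        acc.reverse ++ (pvSplit1 l).modifyHead (cur.reverse ++ ·) := by
  induction fuel with
  | zero => omega
  | succ n ih =>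
    intro l cur acc h
    cases l with
    | nil =>
      rw [PySem.Chars.splitOnMax.go]
      · simp [pvSplit1]
      · omega
    | cons c rest =>
      rw [pv_goM_step]
      simp only [List.length_cons] at h
      by_cases hc : c = ','
      · rw [if_pos hc, pv_goM_zero]
        simp [pvSplit1, hc]
      · rw [if_neg hc, ih rest (c :: cur) _ (by omega)]
        simp only [pvSplit1, if_neg hc]
        rcases pvSplit1_shape rest with ⟨v, hv⟩ | ⟨v, k, hv⟩ <;> simp [hv]

theorem pv_splitOnMax_eq (l : List Char) :
    PySem.Chars.splitOnMax l [','] 1 = pvSplit1 l := by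
  show PySem.Chars.splitOnMax.go [','] (l.length + 1) 1 l [] [] = _
  rw [pv_goM_spec (l.length+1) l [] [] (by omega)]
  rcases pvSplit1_shape l with ⟨v, hv⟩ | ⟨v, k, hv⟩ <;> simp [hv]

-- How A's accumulators absorb a whole segment s (the rest of the current entry)
def pvProc (dv dk : List Char) (flag : Bool) (s : List Char) : List Char × List Char :=
  if flag then
    match pvSplit1 s with
    | [] => (dv, dk)
    | [v] => (dv ++ v, dk)
    | v :: k :: _ => (dv ++ v, dk ++ k)
  else (dv, dk ++ s)

def pvFin (d : PySem.Dict String String) (p : List Char × List Char) : PySem.Dict String String :=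
  d.insert (String.mk (PySem.Chars.strip p.2)) (String.mk (PySem.Chars.strip p.1))

def pvRun (d : PySem.Dict String String) (dv dk : List Char) (flag : Bool) :
    List (List Char) → PySem.Dict String String
  | [] => d
  | s0 :: rest => rest.foldl pvBStep (pvFin d (pvProc dv dk flag s0))

theorem pvBStep_eq (d : PySem.Dict String String) (s : List Char) :
    pvBStep d s = pvFin d (pvProc [] [] true s) := by
  unfold pvBStep pvFin pvProc
  rw [pv_splitOnMax_eq]
  rcases pvSplit1_shape s with ⟨v, hv⟩ | ⟨v, k, hv⟩ <;> simp [hv]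

theorem pvRun_true_empty (d : PySem.Dict String String) (segs : List (List Char)) (h : segs ≠ []) :
    pvRun d [] [] true segs = segs.foldl pvBStep d := by
  cases segs with
  | nil => exact absurd rfl h
  | cons s0 rest => simp [pvRun, ← pvBStep_eq]

theorem pvProc_nil (dv dk : List Char) (flag : Bool) : pvProc dv dk flag [] = (dv, dk) := by
  cases flag <;> simp [pvProc, pvSplit1]

theorem pvProc_cons (dv dk : List Char) (flag : Bool) (c : Char) (s : List Char) (hc : c ≠ '|') :
    (let st := pvAStep (PySem.Dict.empty, dv, dk, flag) c
     pvProc st.2.1 st.2.2.1 st.2.2.2 s) = pvProc dv dk flag (c :: s) := by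
  cases flag with
  | false => simp [pvAStep, hc, pvProc]
  | true =>
    by_cases hcc : c = ','
    · simp [pvAStep, hc, hcc, pvProc, pvSplit1]
    · have h1 : pvSplit1 (c :: s) = (pvSplit1 s).modifyHead (c :: ·) := by simp [pvSplit1, hcc]
      rcases pvSplit1_shape s with ⟨v, hv⟩ | ⟨v, k, hv⟩ <;>
        simp [pvAStep, hc, hcc, pvProc, h1, hv]

theorem pvAStep_dict (d : PySem.Dict String String) (dv dk : List Char) (flag : Bool) (c : Char)
    (hc : c ≠ '|') : pvAStep (d, dv, dk, flag) c =
      (d, (pvAStep (PySem.Dict.empty, dv, dk, flag) c).2) := by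
  cases flag <;> by_cases hcc : c = ',' <;> simp [pvAStep, hc, hcc]

theorem pv_main (cs : List Char) : ∀ (d : PySem.Dict String String) (dv dk : List Char) (flag : Bool),
    (let st := cs.foldl pvAStep (d, dv, dk, flag)
     st.1.insert (String.mk (PySem.Chars.strip st.2.2.1)) (String.mk (PySem.Chars.strip st.2.1)))
    = pvRun d dv dk flag (pvSplit '|' cs) := by
  induction cs with
  | nil =>
    intro d dv dk flag
    simp [pvSplit, pvRun, pvProc_nil, pvFin]
  | cons c cs ih =>
    intro d dv dk flag
    by_cases hc : c = '|'
    · subst hc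
      have hstep : pvAStep (d, dv, dk, flag) '|' = (pvFin d (dv, dk), [], [], true) := by
        cases flag <;> simp [pvAStep, pvFin]
      simp only [List.foldl_cons, hstep, ih]
      rw [pvRun_true_empty _ _ (pvSplit_ne_nil '|' cs)]
      simp [pvSplit, pvRun, pvProc_nil]
    · simp only [List.foldl_cons, pvAStep_dict d dv dk flag c hc, ih]
      have hsp : pvSplit '|' (c :: cs) = (pvSplit '|' cs).modifyHead (c :: ·) := by
        simp [pvSplit, hc]
      rw [hsp]
      cases hs : pvSplit '|' cs with
      | nil => exact absurd hs (pvSplit_ne_nil '|' cs)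
      | cons s0 rest =>
        simp only [List.modifyHead_cons, pvRun]
        rw [← pvProc_cons dv dk flag c s0 hc]

-- ===== VERDICT (by name: the statement is the Claim_ definition above) =====
theorem redcap_str_dict_py_spec : Claim_equal_redcap_str_dict_py := by
  intro s _
  show ((let st := s.toList.foldl pvAStep (PySem.Dict.empty, [], [], true)
         st.1.insert (String.mk (PySem.Chars.strip st.2.2.1))
           (String.mk (PySem.Chars.strip st.2.1))).items)
      = redcap_str_dict_py_alt s
  unfold redcap_str_dict_py_alt
  rw [pv_splitOn_eq, pv_main s.toList PySem.Dict.empty [] [] true,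
      pvRun_true_empty _ _ (pvSplit_ne_nil '|' s.toList)]
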